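-- pv_equiv track=rewrite | github.com/Vishnudharan24/graavitons-sms | backend/api/analysis.py | get_batch_mock_subjects
-- ===== SOURCE A (Python) =====
-- MOCK_SUBJECT_CONFIG = {
--     "maths": {"aliases": {"maths", "mathematics"}},
--     "physics": {"aliases": {"physics"}},
--     "chemistry": {"aliases": {"chemistry"}},
--     "biology": {"aliases": {"biology"}},
-- }
--
-- def get_batch_mock_subjects(batch_subjects):
--     if not batch_subjects:
--         return ["maths", "physics", "chemistry", "biology"]
--
--     selected = []
--     lowered = {str(s).strip().lower() for s in batch_subjects if str(s).strip()}
--     for key in ["maths", "physics", "chemistry", "biology"]: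
--         aliases = MOCK_SUBJECT_CONFIG[key]["aliases"]
--         if lowered.intersection(aliases):
--             selected.append(key)
--
--     return selected if selected else ["maths", "physics", "chemistry", "biology"]
-- ===== SOURCE B (Python) =====
-- MOCK_SUBJECT_CONFIG = {
--     "maths": {"aliases": {"maths", "mathematics"}},
--     "physics": {"aliases": {"physics"}},
--     "chemistry": {"aliases": {"chemistry"}},
--     "biology": {"aliases": {"biology"}},
-- }
--
-- ALIAS_TO_KEY = {alias: key
--                 for key, cfg in MOCK_SUBJECT_CONFIG.items()
--                 for alias in cfg["aliases"]}
--
-- def get_batch_mock_subjects(batch_subjects):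
--     if not batch_subjects:
--         return ["maths", "physics", "chemistry", "biology"]
--
--     matched = set()
--     for s in batch_subjects:
--         key = ALIAS_TO_KEY.get(str(s).strip().lower())
--         if key:
--             matched.add(key)
--
--     return [k for k in ["maths", "physics", "chemistry", "biology"] if k in matched] \
--         or ["maths", "physics", "chemistry", "biology"]
-- ===== Notes on version B (the rewrite author's own statement) =====
-- stated objective: idiomatic
-- what changed: Replaces the per-key scan with set intersections by an inverted alias->key index: one pass over the input subjects looks each normalized subject up in the index and collects matched keys in a set, then the canonical key list is filtered through that set.
import Mathlib
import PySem

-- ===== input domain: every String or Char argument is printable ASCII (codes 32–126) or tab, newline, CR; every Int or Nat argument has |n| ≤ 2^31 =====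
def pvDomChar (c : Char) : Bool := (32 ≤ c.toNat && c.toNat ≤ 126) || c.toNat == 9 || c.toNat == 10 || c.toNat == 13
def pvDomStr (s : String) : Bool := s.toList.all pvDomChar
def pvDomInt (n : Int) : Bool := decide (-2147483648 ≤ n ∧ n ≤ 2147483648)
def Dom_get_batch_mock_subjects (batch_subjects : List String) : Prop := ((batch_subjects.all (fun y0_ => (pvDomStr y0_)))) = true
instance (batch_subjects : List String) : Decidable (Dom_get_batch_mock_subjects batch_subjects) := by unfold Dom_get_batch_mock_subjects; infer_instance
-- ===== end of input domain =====

-- B replaces A's per-key scan with set intersections by an inverted alias→key index and a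
-- single pass over the input subjects (objective: more idiomatic; same ordering and fallbacks).

-- ===== PORT A =====
-- MOCK_SUBJECT_CONFIG: key → aliases set (the inner {"aliases": …} wrapper flattened; A only ever reads ["aliases"])
def pvMockConfig : PySem.Dict String (PySem.Set String) :=
  PySem.Dict.mk [("maths", PySem.Set.ofList ["maths", "mathematics"]),
                 ("physics", PySem.Set.ofList ["physics"]),
                 ("chemistry", PySem.Set.ofList ["chemistry"]),
                 ("biology", PySem.Set.ofList ["biology"])]

def get_batch_mock_subjects (batch_subjects : List String) : List String :=
  if batch_subjects = [] then ["maths", "physics", "chemistry", "biology"]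
  else
    -- lowered = {str(s).strip().lower() for s in batch_subjects if str(s).strip()}
    let lowered : PySem.Set String :=
      PySem.Set.ofList ((batch_subjects.filter (fun s => PySem.Str.strip s ≠ "")).map
        (fun s => PySem.Str.lower (PySem.Str.strip s)))
    -- for key in [...]: aliases = MOCK_SUBJECT_CONFIG[key]["aliases"] (inlined);
    -- if lowered.intersection(aliases): selected.append(key)
    let selected : List String :=
      (["maths", "physics", "chemistry", "biology"]).foldl (fun sel key =>
        if PySem.Set.inter lowered ((PySem.Dict.get? pvMockConfig key).getD []) ≠ []
        then sel ++ [key] else sel) []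
    if selected = [] then ["maths", "physics", "chemistry", "biology"] else selected

-- ===== PORT B =====
-- ALIAS_TO_KEY: the alias keys are pairwise distinct, so the dict comprehension yields exactly these pairs
def pvAliasToKey : PySem.Dict String String :=
  PySem.Dict.mk [("maths", "maths"), ("mathematics", "maths"), ("physics", "physics"),
                 ("chemistry", "chemistry"), ("biology", "biology")]

def get_batch_mock_subjects_alt (batch_subjects : List String) : List String :=
  if batch_subjects = [] then ["maths", "physics", "chemistry", "biology"]
  else
    -- for s in batch_subjects: key = ALIAS_TO_KEY.get(str(s).strip().lower()); if key: matched.add(key)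
    -- (every value of ALIAS_TO_KEY is a nonempty string, so 'if key:' is exactly the some-case)
    let matched : PySem.Set String :=
      batch_subjects.foldl (fun m s =>
        match PySem.Dict.get? pvAliasToKey (PySem.Str.lower (PySem.Str.strip s)) with
        | some k => PySem.Set.add m k
        | none => m) PySem.Set.empty
    let res := (["maths", "physics", "chemistry", "biology"]).filter
      (fun k => PySem.Set.contains matched k)
    if res = [] then ["maths", "physics", "chemistry", "biology"] else res

-- ===== PRECONDITION & SPEC =====
def Spec_get_batch_mock_subjects (batch_subjects : List String) (out : List String) : Prop := out = get_batch_mock_subjects_alt batch_subjects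
instance (batch_subjects : List String) (out : List String) : Decidable (Spec_get_batch_mock_subjects batch_subjects out) := by unfold Spec_get_batch_mock_subjects; infer_instance

-- ===== CLAIM (what is proved, stated in full; the proofs are below) =====
def Claim_equal_get_batch_mock_subjects : Prop := ∀ (batch_subjects : List String), Dom_get_batch_mock_subjects batch_subjects → Spec_get_batch_mock_subjects batch_subjects (get_batch_mock_subjects batch_subjects)

-- ===== LEMMAS AND PROOFS =====

-- ALIAS_TO_KEY lookup as an explicit if-chain
theorem pvGetAliasToKey (x : String) :
    PySem.Dict.get? pvAliasToKey x =
      if x = "maths" then some "maths"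
      else if x = "mathematics" then some "maths"
      else if x = "physics" then some "physics"
      else if x = "chemistry" then some "chemistry"
      else if x = "biology" then some "biology"
      else none := by
  by_cases h1 : x = "maths"
  · subst h1; decide
  by_cases h2 : x = "mathematics"
  · subst h2; decide
  by_cases h3 : x = "physics"
  · subst h3; decide
  by_cases h4 : x = "chemistry"
  · subst h4; decide
  by_cases h5 : x = "biology"
  · subst h5; decide
  simp only [h1, h2, h3, h4, h5, if_false]
  simp [pvAliasToKey, beq_iff_eq,
    Ne.symm h1, Ne.symm h2, Ne.symm h3, Ne.symm h4, Ne.symm h5, PySem.Dict.get?]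

-- for each canonical key k, a lookup hits some k exactly on k's aliases
theorem pvHitKey (x : String) (k : String)
    (hk : k ∈ (["maths", "physics", "chemistry", "biology"] : List String)) :
    (PySem.Dict.get? pvAliasToKey x = some k ↔
      x ∈ (if k = "maths" then (["maths", "mathematics"] : List String) else [k])) := by
  rw [pvGetAliasToKey]
  fin_cases hk <;>
    [skip; skip; skip; skip] <;>
    split_ifs with h1 h2 h3 h4 h5 <;> simp_all

-- membership in B's matched set ↔ some input subject's normalization maps to k
theorem pvMemMatched (bs : List String) (m : PySem.Set String) (k : String) :
    k ∈ bs.foldl (fun m s =>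
        match PySem.Dict.get? pvAliasToKey (PySem.Str.lower (PySem.Str.strip s)) with
        | some k => PySem.Set.add m k
        | none => m) m ↔
      k ∈ m ∨ ∃ s ∈ bs, PySem.Dict.get? pvAliasToKey (PySem.Str.lower (PySem.Str.strip s)) = some k := by
  induction bs generalizing m with
  | nil => simp
  | cons s bs ih =>
    simp only [List.foldl_cons]
    cases h : PySem.Dict.get? pvAliasToKey (PySem.Str.lower (PySem.Str.strip s)) with
    | none =>
      refine (ih _).trans ?_
      simp only [List.exists_mem_cons_iff, h, reduceCtorEq, false_or]
    | some k' =>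
      refine (ih _).trans ?_
      simp only [List.exists_mem_cons_iff, h, PySem.Set.mem_add, Option.some.injEq]
      rw [or_assoc]
      exact or_congr_right (or_congr_left eq_comm)

-- a subject whose strip is empty normalizes to ""
theorem pvNorm_of_strip_empty (s : String) (h : PySem.Str.strip s = "") :
    PySem.Str.lower (PySem.Str.strip s) = "" := by rw [h]; decide

-- A's per-key intersection test ↔ some input subject normalizes into the alias list
theorem pvInterTest (bs : List String) (As : List String) (hne : "" ∉ As) :
    PySem.Set.inter
        (PySem.Set.ofList ((bs.filter (fun s => PySem.Str.strip s ≠ "")).map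
          (fun s => PySem.Str.lower (PySem.Str.strip s)))) As ≠ [] ↔
      ∃ s ∈ bs, PySem.Str.lower (PySem.Str.strip s) ∈ As := by
  rw [ne_eq, List.eq_nil_iff_forall_not_mem]
  push Not
  constructor
  · rintro ⟨x, hx⟩
    rw [PySem.Set.mem_inter] at hx
    obtain ⟨hx1, hx2⟩ := hx
    rw [PySem.Set.mem_ofList, List.mem_map] at hx1
    obtain ⟨s, hs, rfl⟩ := hx1
    exact ⟨s, (List.mem_filter.mp hs).1, hx2⟩
  · rintro ⟨s, hs, hmem⟩
    refine ⟨PySem.Str.lower (PySem.Str.strip s), ?_⟩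
    rw [PySem.Set.mem_inter, PySem.Set.mem_ofList, List.mem_map]
    refine ⟨⟨s, List.mem_filter.mpr ⟨hs, ?_⟩, rfl⟩, hmem⟩
    simp only [decide_eq_true_eq]
    intro hstrip
    exact hne (pvNorm_of_strip_empty s hstrip ▸ hmem)

-- the two ports agree on every input
theorem pv_main (bs : List String) : get_batch_mock_subjects bs = get_batch_mock_subjects_alt bs := by
  unfold get_batch_mock_subjects get_batch_mock_subjects_alt
  by_cases hbs : bs = []
  · simp [hbs]
  simp only [if_neg hbs]
  rw [PySem.List.foldl_append_ite_eq_filter]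
  rw [List.nil_append]
  have hcong : (["maths", "physics", "chemistry", "biology"] : List String).filter
      (fun key => decide (PySem.Set.inter
        (PySem.Set.ofList ((bs.filter (fun s => PySem.Str.strip s ≠ "")).map
          (fun s => PySem.Str.lower (PySem.Str.strip s))))
        ((PySem.Dict.get? pvMockConfig key).getD []) ≠ [])) =
      (["maths", "physics", "chemistry", "biology"] : List String).filter
      (fun k => PySem.Set.contains (bs.foldl (fun m s =>
        match PySem.Dict.get? pvAliasToKey (PySem.Str.lower (PySem.Str.strip s)) with
        | some k => PySem.Set.add m k
        | none => m) PySem.Set.empty) k) := by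
    apply List.filter_congr
    intro k hk
    rw [Bool.eq_iff_iff, decide_eq_true_eq, PySem.Set.contains_iff, pvMemMatched]
    fin_cases hk
    · rw [show (PySem.Dict.get? pvMockConfig "maths").getD [] = ["maths", "mathematics"] by decide,
        pvInterTest bs _ (by decide)]
      simp only [show ∀ x, PySem.Dict.get? pvAliasToKey x = some "maths" ↔ x ∈ (["maths", "mathematics"] : List String) from
        fun x => (pvHitKey x "maths" (by decide)).trans (by norm_num)]
      simp [PySem.Set.empty]
    · rw [show (PySem.Dict.get? pvMockConfig "physics").getD [] = ["physics"] by decide,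
        pvInterTest bs _ (by decide)]
      simp only [show ∀ x, PySem.Dict.get? pvAliasToKey x = some "physics" ↔ x ∈ (["physics"] : List String) from
        fun x => (pvHitKey x "physics" (by decide)).trans (by rw [if_neg (by decide)])]
      simp [PySem.Set.empty]
    · rw [show (PySem.Dict.get? pvMockConfig "chemistry").getD [] = ["chemistry"] by decide,
        pvInterTest bs _ (by decide)]
      simp only [show ∀ x, PySem.Dict.get? pvAliasToKey x = some "chemistry" ↔ x ∈ (["chemistry"] : List String) from
        fun x => (pvHitKey x "chemistry" (by decide)).trans (by rw [if_neg (by decide)])]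
      simp [PySem.Set.empty]
    · rw [show (PySem.Dict.get? pvMockConfig "biology").getD [] = ["biology"] by decide,
        pvInterTest bs _ (by decide)]
      simp only [show ∀ x, PySem.Dict.get? pvAliasToKey x = some "biology" ↔ x ∈ (["biology"] : List String) from
        fun x => (pvHitKey x "biology" (by decide)).trans (by rw [if_neg (by decide)])]
      simp [PySem.Set.empty]
  rw [hcong]

-- ===== VERDICT (by name: the statement is the Claim_ definition above) =====
theorem get_batch_mock_subjects_spec : Claim_equal_get_batch_mock_subjects :=
  fun bs _ => pv_main bs
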